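-- pv_equiv track=rewrite | github.com/hy714335634/Nexus-AI | tools/generated_tools/disease_hpo_mapping_agent/medical_term_standardizer.py | _extract_english_medical_terms
-- ===== SOURCE A (Python) =====
-- from typing import Dict, List, Any, Optional, Union, Tuple
--
-- def _extract_english_medical_terms(text: str) -> List[str]:
--     """从英文文本中提取医学术语"""
--     terms = []
--
--     # 常见英文疾病后缀
--     suffixes = ["disease", "syndrome", "disorder", "itis", "osis", "pathy"]
--
--     # 分词
--     words = text.split()
--
--     # 提取疾病术语
--     i = 0
--     while i < len(words):
--         # 查找以医学后缀结尾的词组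
--         for j in range(i, min(i + 5, len(words))):
--             for suffix in suffixes:
--                 if words[j].lower().endswith(suffix):
--                     term = ' '.join(words[i:j+1])
--                     terms.append(term)
--                     i = j + 1
--                     break
--             else:
--                 continue
--             break
--         else:
--             i += 1
--
--     return terms
-- ===== SOURCE B (Python) =====
-- def _extract_english_medical_terms(text: str) -> list:
--     """Single pass: emit one term per suffix-matching word, using the running
--     start pointer; the 5-word window bound becomes max(start, k - 4)."""
--     suffixes = ("disease", "syndrome", "disorder", "itis", "osis", "pathy")
--     words = text.split()
--     terms = []
--     start = 0
--     for k, w in enumerate(words):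
--         if w.lower().endswith(suffixes):
--             terms.append(' '.join(words[max(start, k - 4):k + 1]))
--             start = k + 1
--     return terms
-- ===== Notes on version B (the rewrite author's own statement) =====
-- stated objective: faster
-- what changed: Replaces A's while-loop with a nested 5-word window rescan (and unit-step advance through non-matching stretches) by a single enumerate pass that emits one term per suffix-matching word, computing the window start directly as max(start, k-4).
import Mathlib
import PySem

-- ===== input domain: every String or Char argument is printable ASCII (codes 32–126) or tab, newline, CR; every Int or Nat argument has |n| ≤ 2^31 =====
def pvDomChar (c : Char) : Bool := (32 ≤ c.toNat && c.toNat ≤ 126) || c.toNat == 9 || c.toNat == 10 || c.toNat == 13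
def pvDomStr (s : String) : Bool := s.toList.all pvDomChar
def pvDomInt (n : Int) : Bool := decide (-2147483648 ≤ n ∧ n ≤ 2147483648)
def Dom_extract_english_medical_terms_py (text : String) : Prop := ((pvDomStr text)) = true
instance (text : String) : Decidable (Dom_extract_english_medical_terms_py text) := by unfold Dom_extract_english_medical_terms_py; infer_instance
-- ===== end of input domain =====

-- B replaces A's windowed rescan loop by one pass over enumerate(words): faster by a constant factor.

-- ===== PORT A =====
def pvSuffixesA : List String := ["disease", "syndrome", "disorder", "itis", "osis", "pathy"]

-- A's inner 'for suffix in suffixes: if words[j].lower().endswith(suffix)' (break = any, in order)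
def pvMatchA (w : String) : Bool := pvSuffixesA.any (fun s => PySem.Str.endswith (PySem.Str.lower w) s)

-- A's inner 'for j in range(i, min(i+5, len(words)))' scan (n = number of window
-- positions left): first matching j, if any
def pvFindJ (words : List String) (j : Nat) : Nat → Option Nat
  | 0 => none
  | n + 1 =>
    if pvMatchA (words.getD j "") then some j else pvFindJ words (j + 1) n

-- A's outer while loop over the start pointer i (fuel ≥ len(words) - i; each
-- iteration advances i by at least one, so words.length fuel is enough)
def pvALoop (words : List String) : Nat → Nat → List String
  | 0, _ => []
  | fuel + 1, i =>
    if i < words.length then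
      match pvFindJ words i (min (i + 5) words.length - i) with
      | some j =>
          PySem.Str.join " " (PySem.List.slice words (some (i : Int)) (some ((j : Int) + 1)))
            :: pvALoop words fuel (j + 1)
      | none => pvALoop words fuel (i + 1)
    else []

def extract_english_medical_terms_py (text : String) : List String :=
  pvALoop (PySem.Str.split₀ text) (PySem.Str.split₀ text).length 0

-- ===== PORT B =====
def pvSuffixesB : List String := ["disease", "syndrome", "disorder", "itis", "osis", "pathy"]

-- B's 'w.lower().endswith(suffixes)' with a tuple of suffixes (true if any matches, in order)
def pvMatchB (w : String) : Bool := pvSuffixesB.any (fun s => PySem.Str.endswith (PySem.Str.lower w) s)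

def extract_english_medical_terms_py_alt (text : String) : List String :=
  let words := PySem.Str.split₀ text
  ((PySem.List.enumerate words 0).foldl
    (fun (acc : List String × Int) (kw : Int × String) =>
      if pvMatchB kw.2 then
        (acc.1 ++ [PySem.Str.join " "
            (PySem.List.slice words (some (max acc.2 (kw.1 - 4))) (some (kw.1 + 1)))],
         kw.1 + 1)
      else acc)
    ([], 0)).1

-- ===== PRECONDITION & SPEC =====
def Spec_extract_english_medical_terms_py (text : String) (out : List String) : Prop := out = extract_english_medical_terms_py_alt text
instance (text : String) (out : List String) : Decidable (Spec_extract_english_medical_terms_py text out) := by unfold Spec_extract_english_medical_terms_py; infer_instance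

-- ===== CLAIM (what is proved, stated in full; the proofs are below) =====
def Claim_equal_extract_english_medical_terms_py : Prop := ∀ (text : String), Dom_extract_english_medical_terms_py text → Spec_extract_english_medical_terms_py text (extract_english_medical_terms_py text)

-- ===== LEMMAS AND PROOFS =====

-- proof-side skeleton of B's pass restricted to the matching entries
def pvGo (words : List String) (ms : List (Int × String)) (i : Int) : List String :=
  match ms with
  | [] => []
  | (m, _) :: rest =>
      PySem.Str.join " " (PySem.List.slice words (some (max i (m - 4))) (some (m + 1)))
        :: pvGo words rest (m + 1)

def pvStep (words : List String) : List String × Int → Int × String → List String × Int :=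
  fun acc kw =>
    if pvMatchB kw.2 then
      (acc.1 ++ [PySem.Str.join " "
          (PySem.List.slice words (some (max acc.2 (kw.1 - 4))) (some (kw.1 + 1)))],
       kw.1 + 1)
    else acc

theorem pvFoldFilter (words : List String) (l : List (Int × String)) (acc : List String × Int) :
    l.foldl (pvStep words) acc = (l.filter (fun p => pvMatchB p.2)).foldl (pvStep words) acc := by
  induction l generalizing acc with
  | nil => rfl
  | cons p rest ih =>
      by_cases h : pvMatchB p.2 <;> simp [h, ih, pvStep]

theorem pvFoldGo (words : List String) (l : List (Int × String)) (acc : List String) (i : Int)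
    (hall : ∀ p ∈ l, pvMatchB p.2 = true) :
    (l.foldl (pvStep words) (acc, i)).1 = acc ++ pvGo words l i := by
  induction l generalizing acc i with
  | nil => simp [pvGo]
  | cons p rest ih =>
      obtain ⟨m, w⟩ := p
      have hm : pvMatchB w = true := hall (m, w) (by simp)
      rw [List.foldl_cons]
      have hstep : pvStep words (acc, i) (m, w)
          = (acc ++ [PySem.Str.join " "
              (PySem.List.slice words (some (max i (m - 4))) (some (m + 1)))], m + 1) := by
        simp only [pvStep, hm, if_true]
      rw [hstep, ih _ _ (fun q hq => hall q (List.mem_cons_of_mem _ hq))]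
      simp [pvGo]

-- the matching entries of enumerate from position i
def pvM (words : List String) (i : Nat) : List (Int × String) :=
  (PySem.List.enumerate (words.drop i) (i : Int)).filter (fun p => pvMatchB p.2)

theorem pvM_cons (words : List String) (i : Nat) (h : i < words.length) :
    pvM words i =
      (if pvMatchB words[i] then [((i : Int), words[i])] else []) ++ pvM words (i + 1) := by
  unfold pvM
  rw [List.drop_eq_getElem_cons h, PySem.List.enumerate_cons, List.filter_cons]
  by_cases hm : pvMatchB words[i] <;>
    simp only [hm, if_true, if_false, List.singleton_append, Bool.false_eq_true,
      List.nil_append] <;> norm_cast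

theorem pvM_skip (words : List String) (i j : Nat) (hij : i ≤ j)
    (hno : ∀ k, i ≤ k → k < j → k < words.length → pvMatchA (words.getD k "") = false) :
    pvM words i = pvM words j := by
  induction j with
  | zero =>
      have h0 : i = 0 := Nat.le_zero.mp hij
      rw [h0]
  | succ n ih =>
      rcases Nat.eq_or_lt_of_le hij with rfl | hlt
      · rfl
      · have hin : i ≤ n := by omega
        rw [ih hin (fun k h1 h2 h3 => hno k h1 (by omega) h3)]
        by_cases hn : n < words.length
        · rw [pvM_cons words n hn]
          have : pvMatchB words[n] = false := by
            have := hno n hin (by omega) hn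
            rwa [List.getD_eq_getElem _ _ hn] at this
          simp [this]
        · unfold pvM
          rw [List.drop_eq_nil_of_le (by omega), List.drop_eq_nil_of_le (by omega)]
          simp [PySem.List.enumerate_nil]

theorem pvM_mem (words : List String) (i : Nat) (p : Int × String) (hp : p ∈ pvM words i) :
    ∃ (k : Nat) (hk : k < words.length), i ≤ k ∧ p = ((k : Int), words[k]'hk) ∧
      pvMatchB (words[k]'hk) = true := by
  unfold pvM at hp
  rw [List.mem_filter] at hp
  obtain ⟨hmem, hmatch⟩ := hp
  rw [PySem.List.mem_enumerate_iff] at hmem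
  obtain ⟨k, hk, rfl⟩ := hmem
  have hlen : i + k < words.length := by simp at hk; omega
  have hval : (words.drop i)[k] = words[i + k]'hlen := List.getElem_drop ..
  refine ⟨i + k, hlen, by omega, ?_, ?_⟩
  · rw [hval]; push_cast; ring_nf
  · rw [hval] at hmatch; exact hmatch

theorem pvFindJ_bounds (words : List String) (j n k : Nat)
    (h : pvFindJ words j n = some k) : j ≤ k ∧ k < j + n := by
  induction n generalizing j with
  | zero => simp [pvFindJ] at h
  | succ n ih =>
      by_cases hm : pvMatchA (words.getD j "") = true
      · rw [pvFindJ, if_pos hm] at h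
        simp at h; omega
      · rw [pvFindJ, if_neg hm] at h
        have := ih (j + 1) h; omega

theorem pvFindJ_none (words : List String) (j n : Nat) (h : pvFindJ words j n = none) :
    ∀ k, j ≤ k → k < j + n → pvMatchA (words.getD k "") = false := by
  induction n generalizing j with
  | zero => intro k h1 h2; omega
  | succ n ih =>
      by_cases hm : pvMatchA (words.getD j "") = true
      · rw [pvFindJ, if_pos hm] at h; simp at h
      · rw [pvFindJ, if_neg hm] at h
        intro k h1 h2
        rcases Nat.eq_or_lt_of_le h1 with rfl | hlt2
        · simpa using hm
        · exact ih (j + 1) h k (by omega) (by omega)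

theorem pvFindJ_least (words : List String) (j n k : Nat)
    (h : pvFindJ words j n = some k) :
    pvMatchA (words.getD k "") = true ∧
      ∀ l, j ≤ l → l < k → pvMatchA (words.getD l "") = false := by
  induction n generalizing j with
  | zero => simp [pvFindJ] at h
  | succ n ih =>
      by_cases hm : pvMatchA (words.getD j "") = true
      · rw [pvFindJ, if_pos hm] at h
        simp at h; subst h
        exact ⟨hm, fun l h1 h2 => by omega⟩
      · rw [pvFindJ, if_neg hm] at h
        obtain ⟨hk, hleast⟩ := ih (j + 1) h
        refine ⟨hk, fun l h1 h2 => ?_⟩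
        rcases Nat.eq_or_lt_of_le h1 with rfl | hlt2
        · simpa using hm
        · exact hleast l (by omega) h2

theorem pvMatchAB (w : String) : pvMatchA w = pvMatchB w := rfl

theorem pvALoop_eq_go (words : List String) (fuel i : Nat)
    (hfuel : words.length ≤ fuel + i) :
    pvALoop words fuel i = pvGo words (pvM words i) (i : Int) := by
  induction fuel generalizing i with
  | zero =>
      unfold pvM
      rw [pvALoop, List.drop_eq_nil_of_le (by omega)]
      simp [PySem.List.enumerate_nil, pvGo]
  | succ fuel ih =>
      rw [pvALoop]
      by_cases h : i < words.length
      · rw [if_pos h]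
        cases hj : pvFindJ words i (min (i + 5) words.length - i) with
        | some j =>
            obtain ⟨hij, hjstop⟩ := pvFindJ_bounds words i _ j hj
            obtain ⟨hjm, hleast⟩ := pvFindJ_least words i _ j hj
            have hjlen : j < words.length := by omega
            have hjwin : j < i + 5 := by omega
            have hskip : pvM words i = pvM words j :=
              pvM_skip words i j hij (fun k h1 h2 _ => hleast k h1 h2)
            rw [hskip, pvM_cons words j hjlen]
            have hjB : pvMatchB words[j] = true := by
              rw [← pvMatchAB]
              rwa [List.getD_eq_getElem _ _ hjlen] at hjm
            simp only [hjB, if_true, List.singleton_append]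
            rw [pvGo, ih (j + 1) (by omega)]
            have hmax : max (i : Int) ((j : Int) - 4) = (i : Int) := by omega
            rw [hmax]
            push_cast
            ring_nf
        | none =>
            have hno := pvFindJ_none words i _ hj
            have hiB : pvMatchB words[i] = false := by
              rw [← pvMatchAB]
              have := hno i (le_refl i) (by omega)
              rwa [List.getD_eq_getElem _ _ h] at this
            rw [pvM_cons words i h, hiB]
            simp only [Bool.false_eq_true, if_false, List.nil_append]
            rw [ih (i + 1) (by omega)]
            -- pvGo at start i equals pvGo at start i+1: head index (if any) is ≥ i+5
            cases hM : pvM words (i + 1) with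
            | nil => simp [pvGo]
            | cons p rest =>
                obtain ⟨k, hk2, hk1, rfl, hkB⟩ := pvM_mem words (i + 1) p (hM ▸ by simp)
                have hkA : pvMatchA (words.getD k "") = true := by
                  rw [pvMatchAB, List.getD_eq_getElem _ _ hk2]; exact hkB
                have hkbig : i + 5 ≤ k := by
                  by_contra hc
                  have := hno k (by omega) (by omega)
                  rw [this] at hkA; exact Bool.false_ne_true hkA
                simp only [pvGo]
                have hmax : max (i : Int) ((k : Int) - 4) = max ((i : Int) + 1) ((k : Int) - 4) := by
                  omega
                rw [hmax]
                push_cast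
                ring_nf
      · rw [if_neg h]
        unfold pvM
        rw [List.drop_eq_nil_of_le (by omega)]
        simp [PySem.List.enumerate_nil, pvGo]

-- ===== VERDICT (by name: the statement is the Claim_ definition above) =====
theorem extract_english_medical_terms_py_spec : Claim_equal_extract_english_medical_terms_py := by
  intro text _
  show extract_english_medical_terms_py text = extract_english_medical_terms_py_alt text
  have halt : extract_english_medical_terms_py_alt text
      = ((PySem.List.enumerate (PySem.Str.split₀ text) 0).foldl
          (pvStep (PySem.Str.split₀ text)) ([], 0)).1 := rfl
  rw [halt, pvFoldFilter, pvFoldGo _ _ [] 0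
    (fun p hp => (List.mem_filter.mp hp).2), List.nil_append]
  show pvALoop (PySem.Str.split₀ text) (PySem.Str.split₀ text).length 0 = _
  rw [pvALoop_eq_go _ _ 0 (by omega)]
  rfl
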